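-- pv_equiv track=rewrite | github.com/imehtn/TIP_102 | Unit2/sess1/v2_advancedproblems.py | declutter
-- ===== SOURCE A (Python) =====
-- def declutter(souvernirs, threshold):
--     #initiate list to return
--     below_threshold = []
--     #create counter for souvernirs
--     from collections import Counter
--     counting = Counter(souvernirs)
--     #for each souvernir in counter
--     for key, val in counting.items():
--         #if value is more than threshold
--         if val < threshold:
--             #add key to lst
--             below_threshold.append(key)
--
--     return below_threshold
-- ===== SOURCE B (Python) =====
-- def declutter(souvernirs, threshold):
--     # Alternative decomposition: repeatedly strip the current head's
--     # occurrences from a shrinking work list instead of building a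
--     # frequency table; each round decides one distinct value.
--     below_threshold = []
--     rest = list(souvernirs)
--     while rest:
--         head = rest[0]
--         if rest.count(head) < threshold:
--             below_threshold.append(head)
--         rest = [x for x in rest if x != head]
--     return below_threshold
-- ===== Notes on version B (the rewrite author's own statement) =====
-- stated objective: alternative
-- what changed: Replaces the single-pass Counter frequency table with a worklist-shrinking loop: each round takes the head of the remaining list, counts it and appends it if below threshold, then filters out all its occurrences, so the list shrinks by one distinct value per round and no dictionary or set is kept.
import Mathlib
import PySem

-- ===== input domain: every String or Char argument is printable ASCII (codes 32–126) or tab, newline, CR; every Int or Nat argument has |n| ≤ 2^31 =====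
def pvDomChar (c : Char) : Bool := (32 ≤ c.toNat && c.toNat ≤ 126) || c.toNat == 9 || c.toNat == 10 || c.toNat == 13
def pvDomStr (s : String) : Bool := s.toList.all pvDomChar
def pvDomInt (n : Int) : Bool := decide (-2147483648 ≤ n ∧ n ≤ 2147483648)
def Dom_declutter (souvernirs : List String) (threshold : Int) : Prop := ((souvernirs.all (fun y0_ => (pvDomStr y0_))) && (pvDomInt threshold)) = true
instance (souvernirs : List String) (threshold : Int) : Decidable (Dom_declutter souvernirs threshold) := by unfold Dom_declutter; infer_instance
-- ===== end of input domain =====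

-- B replaces A's Counter frequency table with a worklist-shrinking loop that decides one distinct value per round; alternative decomposition, same results and order.


-- ===== PORT A =====
def declutter (souvernirs : List String) (threshold : Int) : List String :=
  let counting := PySem.Dict.counter souvernirs
  counting.items.foldl
    (fun below_threshold kv => if kv.2 < threshold then below_threshold ++ [kv.1] else below_threshold)
    []

-- ===== PORT B =====
-- the while loop of Source B: state = (rest, below_threshold); one round per distinct head
def declutterLoop (threshold : Int) : List String → List String → List String
  | [], below_threshold => below_threshold
  | head :: tl, below_threshold =>
    declutterLoop threshold
      ((head :: tl).filter (fun x => !(x == head)))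
      (if (((head :: tl).count head : Int) < threshold) then below_threshold ++ [head]
       else below_threshold)
  termination_by rest _ => rest.length
  decreasing_by
    simp only [List.filter_cons, beq_self_eq_true, Bool.not_true, List.length_cons]
    exact Nat.lt_succ_of_le (List.length_filter_le _ _)

def declutter_alt (souvernirs : List String) (threshold : Int) : List String :=
  declutterLoop threshold souvernirs []

-- ===== PRECONDITION & SPEC =====
def Spec_declutter (souvernirs : List String) (threshold : Int) (out : List String) : Prop := out = declutter_alt souvernirs threshold
instance (souvernirs : List String) (threshold : Int) (out : List String) : Decidable (Spec_declutter souvernirs threshold out) := by unfold Spec_declutter; infer_instance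

-- ===== CLAIM (what is proved, stated in full; the proofs are below) =====
def Claim_equal_declutter : Prop := ∀ (souvernirs : List String) (threshold : Int), Dom_declutter souvernirs threshold → Spec_declutter souvernirs threshold (declutter souvernirs threshold)

-- ===== LEMMAS AND PROOFS =====

-- PySem.Set.discard is filtering out the element (definitional)
theorem discard_eq_filter (s : List String) (x : String) :
    PySem.Set.discard s x = s.filter (fun y => !(y == x)) := rfl

-- dedup commutes with removing one value
theorem ofList_filter_ne (x : String) :
    ∀ tl : List String,
      PySem.Set.ofList (tl.filter (fun y => !(y == x)))
        = (PySem.Set.ofList tl).filter (fun y => !(y == x)) := by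
  intro tl
  induction tl with
  | nil => simp [PySem.Set.ofList_nil]
  | cons y tl ih =>
    by_cases h : y = x
    · subst h
      simp [PySem.Set.ofList_cons, discard_eq_filter,
        List.filter_filter, ih]
    · have hxy : (y == x) = false := beq_eq_false_iff_ne.mpr h
      simp only [List.filter_cons, hxy, Bool.not_false, if_true,
        PySem.Set.ofList_cons, discard_eq_filter, ih, List.filter_filter]
      congr 1
      apply List.filter_congr
      intro a _
      cases h1 : a == y <;> cases h2 : a == x <;> simp

-- counting another value is unaffected by removing x
theorem count_filter_ne (x k : String) (h : k ≠ x) :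
    ∀ l : List String, (l.filter (fun y => !(y == x))).count k = l.count k := by
  intro l
  induction l with
  | nil => rfl
  | cons a l ih =>
    by_cases ha : a = x
    · subst ha
      simp [List.count_cons, ih]
      exact Ne.symm h
    · have : (a == x) = false := beq_eq_false_iff_ne.mpr ha
      simp [this, List.count_cons, ih]

-- after one round, the remaining distinct values keep their counts
theorem tail_step (x : String) (tl : List String) (t : Int) :
    ((PySem.Set.ofList (tl.filter (fun y => !(y == x)))).filter
        (fun k => decide (((tl.filter (fun y => !(y == x))).count k : Int) < t)))
      = ((PySem.Set.discard (PySem.Set.ofList tl) x).filter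
          (fun k => decide (((x :: tl).count k : Int) < t))) := by
  rw [ofList_filter_ne, discard_eq_filter]
  apply List.filter_congr
  intro k hk
  have hkx : k ≠ x := by simpa using (List.of_mem_filter hk)
  rw [count_filter_ne x k hkx]
  simp [Ne.symm hkx]

-- the loop computes: below ++ first occurrences of rest filtered by the count test
theorem declutterLoop_eq (t : Int) :
    ∀ (n : ℕ) (rest below : List String), rest.length ≤ n →
      declutterLoop t rest below
        = below ++ (PySem.Set.ofList rest).filter
            (fun k => decide ((rest.count k : Int) < t)) := by
  intro n
  induction n with
  | zero =>
    intro rest below h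
    have : rest = [] := List.eq_nil_of_length_eq_zero (Nat.le_zero.mp h)
    subst this; simp [declutterLoop, PySem.Set.ofList_nil]
  | succ n ih =>
    intro rest below h
    match rest with
    | [] => simp [declutterLoop, PySem.Set.ofList_nil]
    | x :: tl =>
      rw [declutterLoop]
      simp only [List.filter_cons, beq_self_eq_true, Bool.not_true,
        Bool.false_eq_true, if_false]
      have hlen : (tl.filter (fun y => !(y == x))).length ≤ n := by
        have h1 : (tl.filter (fun y => !(y == x))).length ≤ tl.length :=
          List.length_filter_le _ _
        have h2 : (x :: tl).length = tl.length + 1 := rfl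
        omega
      rw [ih _ _ hlen, PySem.Set.ofList_cons, tail_step]
      by_cases hc : ((x :: tl).count x : Int) < t
      · rw [if_pos hc,
           List.filter_cons_of_pos (by simpa using hc)]
        simp
      · rw [if_neg hc,
           List.filter_cons_of_neg (by simpa using hc)]

-- A's fold over Counter(souvernirs).items is the dedup list filtered by the count test.
theorem declutter_closed (xs : List String) (t : Int) :
    declutter xs t
      = (PySem.Set.ofList xs).filter (fun k => decide ((xs.count k : Int) < t)) := by
  show (PySem.Dict.counter xs).items.foldl
      (fun below_threshold kv => if kv.2 < t then below_threshold ++ [kv.1] else below_threshold)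
      [] = _
  rw [PySem.Dict.items_counter, List.foldl_map,
      PySem.List.foldl_append_ite_eq_filter (p := fun k => ((xs.count k : Int) < t))]
  simp

-- ===== VERDICT (by name: the statement is the Claim_ definition above) =====
theorem declutter_spec : Claim_equal_declutter := by
  intro xs t _
  show declutter xs t = declutter_alt xs t
  rw [declutter_closed]
  show _ = declutterLoop t xs []
  rw [declutterLoop_eq t xs.length xs [] (le_refl _)]
  simp
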